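-- pv_equiv track=rewrite | github.com/faulknerpearce/advent_of_code | 2015/day_5/day_5_pt_2.py | has_no_overlap
-- ===== SOURCE A (Python) =====
-- def has_no_overlap(my_line):
--     prev = my_line[0]
--     for i in range(len(my_line) - 2):
--         if prev == my_line[i+1]:
--             combined = prev + my_line[i+1]
--             if combined[0] == my_line[i+2] :
--                 return False
--         prev = my_line[i+1]
--     return True
-- ===== SOURCE B (Python) =====
-- def _runs(s):
--     # run-length encoding: list of (char, run length)
--     runs = []
--     i = 0
--     while i < len(s):
--         j = i
--         while j < len(s) and s[j] == s[i]:
--             j += 1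
--         runs.append((s[i], j - i))
--         i = j
--     return runs
--
-- def has_no_overlap(my_line):
--     return all(n < 3 for _, n in _runs(my_line))
-- ===== Notes on version B (the rewrite author's own statement) =====
-- stated objective: alternative
-- what changed: B first builds a run-length encoding of the string (a list of (char, run length) pairs) and then returns True iff every run is shorter than 3, replacing A's single-pass overlapping three-index window scan by two staged passes over a different intermediate data structure.
import Mathlib
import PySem

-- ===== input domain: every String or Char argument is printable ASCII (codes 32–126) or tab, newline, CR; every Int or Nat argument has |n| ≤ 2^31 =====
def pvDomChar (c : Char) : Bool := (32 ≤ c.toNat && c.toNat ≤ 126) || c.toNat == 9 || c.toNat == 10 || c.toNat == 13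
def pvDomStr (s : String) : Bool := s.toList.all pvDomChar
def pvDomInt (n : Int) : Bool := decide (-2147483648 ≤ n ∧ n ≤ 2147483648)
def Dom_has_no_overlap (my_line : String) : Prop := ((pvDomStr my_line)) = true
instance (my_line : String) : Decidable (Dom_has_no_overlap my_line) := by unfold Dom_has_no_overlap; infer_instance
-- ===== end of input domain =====

-- B builds a run-length encoding first, then checks all runs are < 3 (objective: alternative decomposition).
-- ===== PORT A =====
-- A's loop: at step i, prev = my_line[i]; compares prev with my_line[i+1] and my_line[i+2],
-- returning False on a triple. Transcribed as structural recursion carrying prev.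
def hasA_loop (prev : Char) : List Char → Bool
  | c1 :: c2 :: rest =>
      if prev == c1 && prev == c2 then false else hasA_loop c1 (c2 :: rest)
  | _ => true

def has_no_overlap (my_line : String) : Bool :=
  match my_line.toList with
  | [] => true  -- Python raises IndexError here (my_line[0]); excluded by Pre_
  | c :: rest => hasA_loop c rest

-- ===== PORT B =====
-- Source B's _runs: outer loop takes the maximal run starting at i (inner while = takeWhile),
-- then continues after it (dropWhile); transcribed as the recursion over the remaining suffix.
def rle : List Char → List (Char × Nat)
  | [] => []
  | c :: rest =>
      (c, 1 + (rest.takeWhile (· == c)).length) :: rle (rest.dropWhile (· == c))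
  termination_by l => l.length
  decreasing_by
    have := List.length_dropWhile_le (· == c) rest
    simp; omega

def has_no_overlap_alt (my_line : String) : Bool :=
  (rle my_line.toList).all (fun p => p.2 < 3)

-- ===== PRECONDITION & SPEC =====
-- Pre_ excludes exactly the empty string, on which Python A raises IndexError.
def Pre_has_no_overlap (my_line : String) : Prop := my_line ≠ ""
instance (my_line : String) : Decidable (Pre_has_no_overlap my_line) := by
  unfold Pre_has_no_overlap; infer_instance

def pvWitness_has_no_overlap : String := "aabcc"

def Spec_has_no_overlap (my_line : String) (out : Bool) : Prop := out = has_no_overlap_alt my_line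
instance (my_line : String) (out : Bool) : Decidable (Spec_has_no_overlap my_line out) := by
  unfold Spec_has_no_overlap; infer_instance

-- ===== CLAIM =====
def Claim_equal_has_no_overlap : Prop := ∀ (my_line : String), Dom_has_no_overlap my_line → Pre_has_no_overlap my_line → Spec_has_no_overlap my_line (has_no_overlap my_line)

-- ===== LEMMAS AND PROOFS =====

-- "no three equal consecutive chars" reference predicate, in A's look-ahead shape
def noTriple : List Char → Bool
  | a :: b :: c :: rest => if a == b && a == c then false else noTriple (b :: c :: rest)
  | _ => true

theorem hasA_eq_noTriple (l : List Char) : ∀ prev, hasA_loop prev l = noTriple (prev :: l) := by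
  induction l with
  | nil => intro prev; rfl
  | cons c rest ih =>
      intro prev
      cases rest with
      | nil => rfl
      | cons d r =>
          simp only [hasA_loop, noTriple]
          split_ifs with h
          · rfl
          · exact ih c

theorem noTriple_cons_ne {a b : Char} (r : List Char) (h : (a == b) = false) :
    noTriple (a :: b :: r) = noTriple (b :: r) := by
  cases r with
  | nil => rfl
  | cons d r' => simp [noTriple, h]

theorem rle_all_eq_noTriple_aux : ∀ (n : Nat) (l : List Char), l.length ≤ n →
    ((rle l).all (fun p => p.2 < 3)) = noTriple l := by
  intro n
  induction n with
  | zero =>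
      intro l hl
      cases l with
      | nil => simp [rle, noTriple]
      | cons c rest => simp at hl
  | succ n ihn =>
      intro l hl
      cases l with
      | nil => simp [rle, noTriple]
      | cons c rest =>
      have ih : ((rle (rest.dropWhile (· == c))).all (fun p => p.2 < 3))
          = noTriple (rest.dropWhile (· == c)) :=
        ihn _ (le_trans (List.length_dropWhile_le _ _) (by simpa using hl))
      rw [rle]
      cases rest with
      | nil => simp [rle, noTriple]
      | cons b r =>
          by_cases hb : b = c
          · subst hb
            cases r with
            | nil => simp [rle, noTriple]
            | cons e r2 =>
                by_cases he : e = b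
                · subst he
                  simp [noTriple]
                  intro h
                  omega
                · have he' : (e == b) = false := by simpa using he
                  have hb' : (b == e) = false := by simpa using (Ne.symm he)
                  simp only [List.takeWhile, List.dropWhile, beq_self_eq_true, he'] at ih ⊢
                  rw [List.all_cons, ih]
                  have h1 : noTriple (b :: b :: e :: r2) = noTriple (b :: e :: r2) := by
                    simp [noTriple, hb']
                  rw [h1, noTriple_cons_ne r2 hb']
                  simp
          · have hb' : (b == c) = false := by simpa using hb
            have hc' : (c == b) = false := by simpa using (Ne.symm hb)
            simp only [List.takeWhile, List.dropWhile, hb'] at ih ⊢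
            rw [List.all_cons, ih, noTriple_cons_ne r hc']
            simp

-- ===== VERDICT =====
theorem has_no_overlap_spec : Claim_equal_has_no_overlap := by
  intro s _ _
  unfold Spec_has_no_overlap has_no_overlap has_no_overlap_alt
  cases h : s.toList with
  | nil => simp [rle]
  | cons c rest =>
      rw [rle_all_eq_noTriple_aux rest.length.succ (c :: rest) (by simp)]
      exact hasA_eq_noTriple rest c
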